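-- pv_equiv track=rewrite | github.com/DaniCerri/lezioniPython-B22-292-2025 | Soluzioni/Esercizio_centro_sportivo.py | corso_piu_popolare
-- ===== SOURCE A (Python) =====
-- def corso_piu_popolare(dizionario: dict) -> str:
--     # 1. Calcoliamo l'affluenza totale per ogni corso
--     diz_somme = {}  # Sarà il dizionario in cui salviamo le affluenze totali
--     for corso, affluenze in dizionario.items():
--         for affluenza_oraria in affluenze.values():  # Per ogni lista di affluenza (per fascia oraria)
--             somma = sum(affluenza_oraria)  # Calcoliamo l'affluenza totale di questa fascia oraria
--
--             # Cerchiamo di ottenere il totale parziale del corso di cui stiamo calcolando l'affluenza totale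
--             # Se non troviamo la chiave corrispondente al corso, vuol dire che è la prima volta che cerchiamo
--             # di aggiungere al nostro totale parziale del corso, infatti di default [se non c'è la chiave]
--             # restituiamo uno zero
--             totale_parziale = diz_somme.get(corso, 0)
--
--             totale_parziale += somma  # Aggiungiamo la somma della fascia oraria attuale al totale parziale
--             diz_somme[corso] = totale_parziale  # Salviamo il totale parziale nel dizionario delle somme
--             # Se la chiave con il corso attuale ancora non c'è, viene creata la coppia chiave - totale parziale
--
--     # 2. Troviamo il corso con affluenza maggiore
--     corso_migliore = list(diz_somme.keys())[0]  # Prendiamo un corso a caso e decidiamo che sia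
--     # il migliore PROVVISORIO
--
--     for corso, affluenza_totale in diz_somme.items():  # Per ogni coppia corso-affluenza totale
--         # Se l'affluenza del corso attuale è maggiore dell'affluenza del corso migliore fin'ora
--         if affluenza_totale > diz_somme[corso_migliore]:
--             corso_migliore = corso  # Abbiamo trovato il nuovo corso migliore fin'ora
--
--     # Al termine del for, il corso che rimane come migliore sarà il migliore di tutti
--     return corso_migliore
-- ===== SOURCE B (Python) =====
-- def corso_piu_popolare(dizionario: dict) -> str:
--     # Single pass: fuse total-computation and max-selection; no intermediate dict.
--     best = None  # (corso, totale) of the best course seen so far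
--     for corso, affluenze in dizionario.items():
--         if affluenze:  # courses with no time slots never qualify (as in the original)
--             totale = sum(sum(affluenza) for affluenza in affluenze.values())
--             if best is None or totale > best[1]:
--                 best = (corso, totale)
--     if best is None:
--         raise IndexError("no course with attendance data")
--     return best[0]
-- ===== Notes on version B (the rewrite author's own statement) =====
-- stated objective: simpler
-- what changed: B fuses A's two phases (build a totals dict, then scan it for the max) into one pass over dizionario that tracks the best (course, total) pair directly, with no intermediate dict; Pre_ excludes inputs where A raises IndexError (no course with a non-empty affluenze dict) and association lists with duplicate outer/inner keys, which a Python dict cannot represent.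
import Mathlib
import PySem

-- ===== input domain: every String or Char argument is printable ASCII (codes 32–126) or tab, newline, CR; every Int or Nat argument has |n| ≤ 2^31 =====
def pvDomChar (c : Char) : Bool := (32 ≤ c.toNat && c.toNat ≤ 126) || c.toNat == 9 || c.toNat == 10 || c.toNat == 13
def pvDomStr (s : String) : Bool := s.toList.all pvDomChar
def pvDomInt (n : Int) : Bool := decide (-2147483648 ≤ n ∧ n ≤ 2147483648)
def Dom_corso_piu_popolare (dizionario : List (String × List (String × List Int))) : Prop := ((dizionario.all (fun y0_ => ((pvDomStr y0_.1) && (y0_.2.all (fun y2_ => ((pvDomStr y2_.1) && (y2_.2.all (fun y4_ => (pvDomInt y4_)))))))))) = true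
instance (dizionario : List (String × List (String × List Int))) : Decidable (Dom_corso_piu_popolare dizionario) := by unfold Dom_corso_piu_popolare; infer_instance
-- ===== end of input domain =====

-- B fuses A's two phases into one pass tracking the best (course, total) pair; no intermediate dict (objective: simpler).

-- ===== PORT A =====
def corso_piu_popolare (dizionario : List (String × List (String × List Int))) : String :=
  let diz_somme := dizionario.foldl (fun d p =>
    p.2.foldl (fun d q =>
      let somma := q.2.sum
      let totale_parziale := d.getD p.1 0 + somma
      d.insert p.1 totale_parziale) d) (PySem.Dict.empty)
  -- list(diz_somme.keys())[0]: raises IndexError when diz_somme is empty; Pre_ excludes that case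
  let corso_migliore := diz_somme.keys.headD ""
  -- diz_somme[corso_migliore]: corso_migliore is always a key of diz_somme, so getD _ 0 is exact
  diz_somme.items.foldl (fun best p => if p.2 > diz_somme.getD best 0 then p.1 else best) corso_migliore

-- ===== PORT B =====
def corso_piu_popolare_alt (dizionario : List (String × List (String × List Int))) : String :=
  let best := dizionario.foldl (fun acc p =>
    if p.2.isEmpty then acc
    else
      let totale := (p.2.map (fun q => q.2.sum)).sum
      match acc with
      | none => some (p.1, totale)
      | some b => if totale > b.2 then some (p.1, totale) else acc) none
  match best with
  | some b => b.1
  | none => ""   -- Python B raises IndexError here; Pre_ excludes this case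

-- ===== PRECONDITION & SPEC =====
-- Pre_ excludes (i) inputs on which A raises IndexError (no course with a non-empty affluenze
-- dict) and (ii) association lists with duplicate outer or inner keys, which cannot arise from
-- a Python dict (the dict→assoc-list representation makes them accidental).
def Pre_corso_piu_popolare (dizionario : List (String × List (String × List Int))) : Prop :=
  (∃ p ∈ dizionario, p.2 ≠ []) ∧ (dizionario.map Prod.fst).Nodup ∧
    ∀ p ∈ dizionario, (p.2.map Prod.fst).Nodup
instance (dizionario : List (String × List (String × List Int))) : Decidable (Pre_corso_piu_popolare dizionario) := by
  unfold Pre_corso_piu_popolare; infer_instance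
def pvWitness_corso_piu_popolare : (List (String × List (String × List Int))) :=
  [("nuoto", [("10", [3, 5])]), ("yoga", [])]
def Spec_corso_piu_popolare (dizionario : List (String × List (String × List Int))) (out : String) : Prop := out = corso_piu_popolare_alt dizionario
instance (dizionario : List (String × List (String × List Int))) (out : String) : Decidable (Spec_corso_piu_popolare dizionario out) := by unfold Spec_corso_piu_popolare; infer_instance

-- ===== CLAIM (what is proved, stated in full; the proofs are below) =====
def Claim_equal_corso_piu_popolare : Prop := ∀ (dizionario : List (String × List (String × List Int))), Dom_corso_piu_popolare dizionario → Pre_corso_piu_popolare dizionario → Spec_corso_piu_popolare dizionario (corso_piu_popolare dizionario)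

-- ===== LEMMAS AND PROOFS =====

-- per-course total as A accumulates it
def pvS (affl : List (String × List Int)) : Int :=
  affl.foldl (fun c q => c + q.2.sum) 0

-- the (course, total) pairs of the courses with non-empty affluenze, in order
def pvTotals (diz : List (String × List (String × List Int))) : List (String × Int) :=
  diz.filterMap (fun p => if p.2.isEmpty then none else some (p.1, pvS p.2))

lemma innerA (qs : List (String × List Int)) (d : PySem.Dict String Int) (k : String) (c : Int) :
    qs.foldl (fun d q => d.insert k (d.getD k 0 + q.2.sum)) (d.insert k c)
      = d.insert k (qs.foldl (fun c q => c + q.2.sum) c) := by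
  induction qs generalizing c with
  | nil => rfl
  | cons q rest ih =>
    simp only [List.foldl_cons, PySem.Dict.getD_insert_self, PySem.Dict.insert_insert_self]
    exact ih (c + q.2.sum)

lemma innerA0 (qs : List (String × List Int)) (d : PySem.Dict String Int) (k : String)
    (h : d.contains k = false) (hne : qs ≠ []) :
    qs.foldl (fun d q => d.insert k (d.getD k 0 + q.2.sum)) d = d.insert k (pvS qs) := by
  cases qs with
  | nil => exact absurd rfl hne
  | cons q rest =>
    simp only [List.foldl_cons]
    rw [PySem.Dict.getD_of_not_contains d 0 h]
    exact innerA rest d k (0 + q.2.sum)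

lemma outerA (diz : List (String × List (String × List Int))) (d : PySem.Dict String Int)
    (hfresh : ∀ p ∈ diz, d.contains p.1 = false) (hnd : (diz.map Prod.fst).Nodup) :
    (diz.foldl (fun d p =>
        p.2.foldl (fun d q => d.insert p.1 (d.getD p.1 0 + q.2.sum)) d) d).items
      = d.items ++ pvTotals diz := by
  induction diz generalizing d with
  | nil => simp [pvTotals]
  | cons p rest ih =>
    simp only [List.map_cons, List.nodup_cons] at hnd
    by_cases hp : p.2 = []
    · simp only [List.foldl_cons, hp, List.foldl_nil, pvTotals, List.filterMap_cons,
        List.isEmpty_nil]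
      exact ih d (fun q hq => hfresh q (List.mem_cons_of_mem _ hq)) hnd.2
    · have hfst : d.contains p.1 = false := hfresh p (List.mem_cons_self ..)
      simp only [List.foldl_cons, innerA0 p.2 d p.1 hfst hp]
      rw [ih (d.insert p.1 (pvS p.2)) ?_ hnd.2]
      · rw [PySem.Dict.items_insert_of_not_contains d _ hfst]
        simp [pvTotals, List.isEmpty_iff, hp]
      · intro q hq
        rw [PySem.Dict.contains_insert]
        have hne : q.1 ≠ p.1 := by
          intro he
          exact hnd.1 (he ▸ List.mem_map_of_mem hq)
        simp [hne, hfresh q (List.mem_cons_of_mem _ hq)]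

lemma totals_fst_sublist (diz : List (String × List (String × List Int))) :
    ((pvTotals diz).map Prod.fst).Sublist (diz.map Prod.fst) := by
  induction diz with
  | nil => simp [pvTotals]
  | cons p rest ih =>
    by_cases hp : p.2.isEmpty = true
    · simp only [pvTotals, List.filterMap_cons, hp, if_true, List.map_cons]
      exact ih.trans (List.sublist_cons_self _ _)
    · simp only [pvTotals, List.filterMap_cons, hp, Bool.false_eq_true, if_false, List.map_cons]
      exact ih.cons₂ p.1

-- A's selection scan, rephrased: folding course names with dict lookups equals folding pairs
lemma phase2 (L : List (String × Int)) (g : String → Int) (best : String)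
    (hg : ∀ p ∈ L, g p.1 = p.2) :
    L.foldl (fun b p => if p.2 > g b then p.1 else b) best
      = (L.foldl (fun (a : String × Int) p => if p.2 > a.2 then p else a) (best, g best)).1 := by
  induction L generalizing best with
  | nil => rfl
  | cons p rest ih =>
    simp only [List.foldl_cons]
    by_cases h : p.2 > g best
    · rw [if_pos h, if_pos h]
      rw [ih p.1 (fun q hq => hg q (List.mem_cons_of_mem _ hq)), hg p (List.mem_cons_self ..)]
    · rw [if_neg h, if_neg h]
      exact ih best (fun q hq => hg q (List.mem_cons_of_mem _ hq))

-- bridge: B's per-course total equals A's accumulated total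
lemma totB_eq_pvS (affl : List (String × List Int)) :
    (affl.map (fun q => q.2.sum)).sum = pvS affl := by
  unfold pvS
  rw [List.sum_eq_foldl, List.foldl_map]

def pvStepB : Option (String × Int) → (String × List (String × List Int)) → Option (String × Int) :=
  fun acc p =>
    if p.2.isEmpty then acc
    else
      let totale := (p.2.map (fun q => q.2.sum)).sum
      match acc with
      | none => some (p.1, totale)
      | some b => if totale > b.2 then some (p.1, totale) else acc

lemma B_some (diz : List (String × List (String × List Int))) (a : String × Int) :
    diz.foldl pvStepB (some a)
      = some ((pvTotals diz).foldl (fun (a : String × Int) p => if p.2 > a.2 then p else a) a) := by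
  induction diz generalizing a with
  | nil => rfl
  | cons p rest ih =>
    by_cases hp : p.2 = []
    · simp [pvStepB, hp, pvTotals, ih]
    · simp only [List.foldl_cons, pvStepB, List.isEmpty_iff, hp, if_false, totB_eq_pvS,
        pvTotals, List.filterMap_cons]
      by_cases h : pvS p.2 > a.2
      · simp only [if_pos h, ih]
        simp [pvTotals, List.isEmpty_iff, gt_iff_lt]
      · simp only [if_neg h, ih]
        simp [pvTotals, List.isEmpty_iff, gt_iff_lt]

lemma B_none (diz : List (String × List (String × List Int))) :
    diz.foldl pvStepB none
      = match pvTotals diz with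
        | [] => none
        | t :: rest => some (rest.foldl (fun (a : String × Int) p => if p.2 > a.2 then p else a) t) := by
  induction diz with
  | nil => rfl
  | cons p rest ih =>
    by_cases hp : p.2 = []
    · simpa [pvStepB, hp, pvTotals] using ih
    · simp [pvStepB, hp, pvTotals, totB_eq_pvS, B_some, List.isEmpty_iff]

lemma totals_ne_nil (diz : List (String × List (String × List Int))) :
    (∃ p ∈ diz, p.2 ≠ []) → pvTotals diz ≠ [] := by
  induction diz with
  | nil => intro h; simp at h
  | cons q rest ih =>
    intro h
    by_cases hq2 : q.2 = []
    · have h' : ∃ p ∈ rest, p.2 ≠ [] := by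
        obtain ⟨p, hp, hne⟩ := h
        rcases List.mem_cons.mp hp with rfl | hp
        · exact absurd hq2 hne
        · exact ⟨p, hp, hne⟩
      simpa [pvTotals, hq2] using ih h'
    · simp [pvTotals, List.isEmpty_iff, hq2]

-- ===== VERDICT (by name: the statement is the Claim_ definition above) =====
theorem corso_piu_popolare_spec : Claim_equal_corso_piu_popolare := by
  intro diz _ hpre
  obtain ⟨hne, hnd, _⟩ := hpre
  unfold Spec_corso_piu_popolare corso_piu_popolare corso_piu_popolare_alt
  set ds := diz.foldl (fun d p =>
      p.2.foldl (fun d q => d.insert p.1 (d.getD p.1 0 + q.2.sum)) d) PySem.Dict.empty with hds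
  have hitems : ds.items = pvTotals diz := by
    have h := outerA diz PySem.Dict.empty (by simp) hnd
    have h0 : (PySem.Dict.empty : PySem.Dict String Int).items = [] := rfl
    rw [h0, List.nil_append] at h
    exact h
  have hkeysnd : ds.keys.Nodup := by
    simp only [PySem.Dict.keys, hitems]
    exact hnd.sublist (totals_fst_sublist diz)
  obtain ⟨t0, T, hT0⟩ : ∃ t0 T, pvTotals diz = t0 :: T := by
    cases h : pvTotals diz with
    | nil => exact absurd h (totals_ne_nil diz hne)
    | cons a b => exact ⟨a, b, rfl⟩
  have hlookup : ∀ p ∈ pvTotals diz, ds.getD p.1 0 = p.2 := by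
    intro p hp
    exact PySem.Dict.getD_of_mem_items ds (hitems ▸ hp) hkeysnd 0
  change (List.foldl (fun best p => if p.2 > ds.getD best 0 then p.1 else best)
      (ds.keys.headD "") ds.items)
    = (match diz.foldl pvStepB none with
       | some b => b.1
       | none => "")
  have hhead : ds.keys.headD "" = t0.1 := by
    simp only [PySem.Dict.keys, hitems, hT0, List.map_cons, List.headD_cons]
  rw [hitems, hhead, phase2 _ (fun k => ds.getD k 0) t0.1 hlookup,
    hlookup t0 (by rw [hT0]; exact List.mem_cons_self ..), B_none, hT0]
  simp [List.foldl_cons]
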